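-- pv_equiv track=rewrite | github.com/egordionok/MAI | CompMath/Lab2/prog2.py | find_bound
-- ===== SOURCE A (Python) =====
-- def find_bound(coefs_):
--     xi = 1
--     if coefs_[0] < 0:
--         coefs_ = [-i for i in coefs_]
--
--     while True:
--         flag = True
--         newcoefs = [coefs_[0]]
--         for i in range(1, len(coefs_)):
--             coef = coefs_[i] + newcoefs[i - 1] * xi
--             if coef < 0:
--                 xi += 1
--                 flag = False
--                 break
--             newcoefs.append(coef)
--         if flag:
--             break
--
--     return xi
-- ===== SOURCE B (Python) =====
-- def find_bound(coefs_):
--     cs = coefs_ if coefs_[0] >= 0 else [-c for c in coefs_]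
--
--     def ok(xi):
--         p = cs[0]
--         for c in cs[1:]:
--             p = c + p * xi
--             if p < 0:
--                 return False
--         return True
--
--     hi = 1
--     while not ok(hi):
--         hi *= 2
--     lo = hi // 2 + 1 if hi > 1 else 1
--     while lo < hi:
--         mid = (lo + hi) // 2
--         if ok(mid):
--             hi = mid
--         else:
--             lo = mid + 1
--     return lo
-- ===== Notes on version B (the rewrite author's own statement) =====
-- stated objective: faster
-- what changed: Replaces A's linear scan xi=1,2,3,... with exponential search for an upper bound followed by binary search for the least xi whose Horner partial sums are all nonnegative (valid because that condition is monotone in xi once the leading coefficient is normalised nonnegative).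
import Mathlib
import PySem

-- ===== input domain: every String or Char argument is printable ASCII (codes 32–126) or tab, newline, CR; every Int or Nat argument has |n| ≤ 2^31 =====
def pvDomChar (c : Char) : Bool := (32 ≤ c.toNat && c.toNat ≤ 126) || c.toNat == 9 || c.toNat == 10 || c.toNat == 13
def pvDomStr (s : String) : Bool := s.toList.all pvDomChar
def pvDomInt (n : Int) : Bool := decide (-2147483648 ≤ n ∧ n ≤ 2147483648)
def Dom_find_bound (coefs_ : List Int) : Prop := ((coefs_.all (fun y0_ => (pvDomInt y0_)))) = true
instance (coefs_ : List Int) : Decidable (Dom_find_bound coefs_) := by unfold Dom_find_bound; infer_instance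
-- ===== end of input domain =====

-- B replaces A's xi = 1, 2, 3, ... linear scan by exponential search then binary search
-- over xi (the all-Horner-partials-nonnegative test is monotone in xi after normalisation).

-- ===== PORT A =====
-- upper bound used only as FUEL for the while-True loops of both ports: the max of |c|
-- (proved below that the least valid xi never exceeds this + 1, so the fuel is never hit)
def pvMaxAbs (l : List Int) : Int := l.foldl (fun m c => max m |c|) 0

-- A's inner 'for i in range(1, len(coefs_))' loop; the accumulator is newcoefs kept in
-- reverse order (append = cons), so newcoefs[i-1] is the head; returns 'flag'
def pvInner : List Int → List Int → Int → Bool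
  | [], _, _ => true
  | c :: rest, newcoefs, xi =>
    let coef := c + newcoefs.headD 0 * xi
    if coef < 0 then false else pvInner rest (coef :: newcoefs) xi

-- one body of A's 'while True' loop: newcoefs = [coefs_[0]], then the inner for-loop
def pvFlag (cs : List Int) (xi : Int) : Bool :=
  match cs with
  | [] => true
  | c0 :: rest => pvInner rest [c0] xi

-- A's 'while True' loop (the fuel only makes the recursion structural; proved sufficient under Pre_)
def pvLoopA (cs : List Int) : Nat → Int → Int
  | 0, xi => xi
  | Nat.succ fuel, xi => if pvFlag cs xi then xi else pvLoopA cs fuel (xi + 1)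

def find_bound (coefs_ : List Int) : Int :=
  let cs := if ((PySem.List.pyGet? coefs_ 0).getD 0) < 0 then coefs_.map (fun i => -i) else coefs_
  pvLoopA cs ((pvMaxAbs cs).toNat + 2) 1

-- ===== PORT B =====
-- B's ok(xi): p runs over the Horner partial values of cs[1:]
def pvOkAux : List Int → Int → Int → Bool
  | [], _, _ => true
  | c :: rest, p, xi =>
    let p' := c + p * xi
    if p' < 0 then false else pvOkAux rest p' xi

def pvOk (cs : List Int) (xi : Int) : Bool :=
  match cs with
  | [] => true
  | c0 :: rest => pvOkAux rest c0 xi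

-- B's 'while not ok(hi): hi *= 2' (fuel makes the recursion structural; sufficient under Pre_)
def pvExpo (cs : List Int) : Nat → Int → Int
  | 0, hi => hi
  | Nat.succ fuel, hi => if pvOk cs hi then hi else pvExpo cs fuel (hi * 2)

-- B's binary-search 'while lo < hi' loop (fuel only makes the recursion structural;
-- the interval shrinks each pass, so (hi - lo).toNat passes always suffice)
def pvBin (cs : List Int) : Nat → Int → Int → Int
  | 0, lo, _ => lo
  | Nat.succ fuel, lo, hi =>
    if lo < hi then
      let mid := PySem.Int.floordiv (lo + hi) 2
      if pvOk cs mid then pvBin cs fuel lo mid else pvBin cs fuel (mid + 1) hi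
    else lo

def find_bound_alt (coefs_ : List Int) : Int :=
  let cs := if 0 ≤ ((PySem.List.pyGet? coefs_ 0).getD 0) then coefs_ else coefs_.map (fun c => -c)
  let hi := pvExpo cs ((pvMaxAbs cs).toNat + 2) 1
  let lo := if 1 < hi then PySem.Int.floordiv hi 2 + 1 else 1
  pvBin cs ((hi - lo).toNat) lo hi

-- ===== PRECONDITION & SPEC =====
-- Pre_ excludes the empty list (A raises IndexError on coefs_[0]) and lists whose first
-- element is ≥ 0 but whose first NONZERO element is negative (A's while-loop never
-- terminates on those; B diverges there as well).
def Pre_find_bound (coefs_ : List Int) : Prop :=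
  coefs_ ≠ [] ∧
    (coefs_.headD 0 < 0 ∨ (coefs_.dropWhile (fun c => c == 0)) = [] ∨
      0 < (coefs_.dropWhile (fun c => c == 0)).headD 0)
instance (coefs_ : List Int) : Decidable (Pre_find_bound coefs_) := by
  unfold Pre_find_bound; infer_instance

def pvWitness_find_bound : List Int := ([2, -7, 3])

def Spec_find_bound (coefs_ : List Int) (out : Int) : Prop := out = find_bound_alt coefs_
instance (coefs_ : List Int) (out : Int) : Decidable (Spec_find_bound coefs_ out) := by
  unfold Spec_find_bound; infer_instance

-- ===== CLAIM (what is proved, stated in full; the proofs are below) =====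
def Claim_equal_find_bound : Prop := ∀ (coefs_ : List Int), Dom_find_bound coefs_ → Pre_find_bound coefs_ → Spec_find_bound coefs_ (find_bound coefs_)

-- ===== LEMMAS AND PROOFS =====

-- A's inner loop only ever reads the last element of newcoefs, i.e. the head of the
-- reversed accumulator: it computes the same Bool as B's ok-scan.
theorem pvInner_eq_okAux (xi : Int) :
    ∀ (l : List Int) (p : Int) (acc : List Int), pvInner l (p :: acc) xi = pvOkAux l p xi := by
  intro l
  induction l with
  | nil => intro p acc; rfl
  | cons c l ih =>
    intro p acc
    simp only [pvInner, pvOkAux, List.headD_cons]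
    by_cases h : c + p * xi < 0
    · simp [h]
    · simp only [if_neg h]
      exact ih _ _

theorem pvFlag_eq_ok (cs : List Int) (xi : Int) : pvFlag cs xi = pvOk cs xi := by
  cases cs with
  | nil => rfl
  | cons c0 rest => exact pvInner_eq_okAux xi rest c0 []

-- monotonicity of the scan in both the seed and the evaluation point
theorem pvOkAux_mono {x y : Int} (hx : 1 ≤ x) (hxy : x ≤ y) :
    ∀ (l : List Int) (p q : Int), 0 ≤ p → p ≤ q →
      pvOkAux l p x = true → pvOkAux l q y = true := by
  intro l
  induction l with
  | nil => intro p q _ _ _; rfl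
  | cons c l ih =>
    intro p q hp0 hpq h
    simp only [pvOkAux] at h ⊢
    by_cases hc : c + p * x < 0
    · simp [hc] at h
    · have hq0 : 0 ≤ q := le_trans hp0 hpq
      have h1 : p * x ≤ q * x := mul_le_mul_of_nonneg_right hpq (by linarith)
      have h2 : q * x ≤ q * y := mul_le_mul_of_nonneg_left hxy hq0
      have hge : c + p * x ≤ c + q * y := by linarith
      have hpx0 : 0 ≤ c + p * x := not_lt.mp hc
      rw [if_neg hc] at h
      rw [if_neg (by linarith : ¬ c + q * y < 0)]
      exact ih _ _ hpx0 hge h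

-- foldl-max facts
theorem pvFoldlMax_le_init : ∀ (l : List Int) (a : Int), a ≤ l.foldl (fun m c => max m |c|) a := by
  intro l
  induction l with
  | nil => intro a; simp
  | cons c l ih => intro a; simpa using le_trans (le_max_left a |c|) (ih (max a |c|))

theorem pvMem_le_foldlMax : ∀ (l : List Int) (a c : Int), c ∈ l → |c| ≤ l.foldl (fun m c => max m |c|) a := by
  intro l
  induction l with
  | nil => intro a c h; simp at h
  | cons d l ih =>
    intro a c h
    rcases List.mem_cons.mp h with rfl | h
    · simpa using le_trans (le_max_right a |c|) (pvFoldlMax_le_init l (max a |c|))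
    · simpa using ih (max a |d|) c h

theorem pvMaxAbs_nonneg (l : List Int) : 0 ≤ pvMaxAbs l := pvFoldlMax_le_init l 0

theorem pvMem_le_pvMaxAbs (l : List Int) (c : Int) (h : c ∈ l) : |c| ≤ pvMaxAbs l :=
  pvMem_le_foldlMax l 0 c h

-- the scan succeeds at xi = M + 1 when the seed is ≥ 1
theorem pvOkAux_ge1 {M : Int} (hM : 0 ≤ M) :
    ∀ (l : List Int) (p : Int), (∀ c ∈ l, |c| ≤ M) → 1 ≤ p → pvOkAux l p (M + 1) = true := by
  intro l
  induction l with
  | nil => intro p _ _; rfl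
  | cons c l ih =>
    intro p hb hp
    have hc : |c| ≤ M := hb c List.mem_cons_self
    have hcM : -M ≤ c := (abs_le.mp hc).1
    have hmul : 1 * (M + 1) ≤ p * (M + 1) := mul_le_mul_of_nonneg_right hp (by linarith)
    have hp' : 1 ≤ c + p * (M + 1) := by linarith
    simp only [pvOkAux]
    rw [if_neg (by linarith : ¬ c + p * (M + 1) < 0)]
    exact ih _ (fun d hd => hb d (List.mem_cons_of_mem _ hd)) hp'

-- the scan succeeds at xi = M + 1 from seed 0 when the first nonzero element (if any) is positive
theorem pvOkAux_zeros {M : Int} (hM : 0 ≤ M) :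
    ∀ (l : List Int), (∀ c ∈ l, |c| ≤ M) →
      (l.dropWhile (fun c => c == 0) = [] ∨ 0 < (l.dropWhile (fun c => c == 0)).headD 0) →
      pvOkAux l 0 (M + 1) = true := by
  intro l
  induction l with
  | nil => intro _ _; rfl
  | cons c l ih =>
    intro hb hg
    by_cases hc : c = 0
    · subst hc
      have hg' : l.dropWhile (fun c => c == 0) = [] ∨ 0 < (l.dropWhile (fun c => c == 0)).headD 0 := by
        simpa [List.dropWhile_cons] using hg
      simp only [pvOkAux]
      rw [if_neg (by norm_num : ¬ (0 : Int) + 0 * (M + 1) < 0)]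
      have := ih (fun d hd => hb d (List.mem_cons_of_mem _ hd)) hg'
      simpa using this
    · have hdw : (c :: l).dropWhile (fun c => c == 0) = c :: l := by
        simp [hc]
      rw [hdw] at hg
      have hcpos : 0 < c := by
        rcases hg with h | h
        · exact absurd h (by simp)
        · simpa using h
      simp only [pvOkAux]
      rw [if_neg (by linarith : ¬ c + 0 * (M + 1) < 0)]
      exact pvOkAux_ge1 hM l _ (fun d hd => hb d (List.mem_cons_of_mem _ hd))
        (by linarith : (1 : Int) ≤ c + 0 * (M + 1))

-- A's while-loop returns the least xi ≥ start whose check succeeds (given enough fuel)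
theorem pvLoopA_spec (cs : List Int) (b : Int) (hokb : pvOk cs b = true) :
    ∀ (fuel : Nat) (xi : Int), 1 ≤ xi → xi ≤ b → b < xi + (fuel : Int) →
      (∀ x : Int, 1 ≤ x → x < xi → pvOk cs x = false) →
      pvOk cs (pvLoopA cs fuel xi) = true ∧ 1 ≤ pvLoopA cs fuel xi ∧
        (∀ x : Int, 1 ≤ x → x < pvLoopA cs fuel xi → pvOk cs x = false) := by
  intro fuel
  induction fuel with
  | zero => intro xi _ hxb hlt _; exfalso; push_cast at hlt; omega
  | succ n ih =>
    intro xi hxi hxb hlt hinv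
    cases hcase : pvOk cs xi with
    | true =>
      have hred : pvLoopA cs (Nat.succ n) xi = xi := by
        simp [pvLoopA, pvFlag_eq_ok, hcase]
      rw [hred]
      exact ⟨hcase, hxi, hinv⟩
    | false =>
      have hxib : xi ≠ b := by
        intro h; subst h; rw [hokb] at hcase; simp at hcase
      have hred : pvLoopA cs (Nat.succ n) xi = pvLoopA cs n (xi + 1) := by
        simp [pvLoopA, pvFlag_eq_ok, hcase]
      rw [hred]
      refine ih (xi + 1) (by omega) (by omega) (by push_cast at hlt ⊢; omega) ?_
      intro x hx1 hx2
      rcases (by omega : x < xi ∨ x = xi) with h | h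
      · exact hinv x hx1 h
      · exact h ▸ hcase

-- B's exponential loop: returns a succeeding hi which is either 1 or double a failing value
theorem pvExpo_spec (cs : List Int) (b : Int) (hb1 : 1 ≤ b) (hokb : pvOk cs b = true)
    (hmono : ∀ x y : Int, 1 ≤ x → x ≤ y → pvOk cs x = true → pvOk cs y = true) :
    ∀ (fuel : Nat) (hi : Int), 1 ≤ hi → b ≤ hi * (2 : Int) ^ fuel →
      (hi = 1 ∨ ∃ h2, hi = 2 * h2 ∧ 1 ≤ h2 ∧ pvOk cs h2 = false) →
      pvOk cs (pvExpo cs fuel hi) = true ∧ 1 ≤ pvExpo cs fuel hi ∧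
        (pvExpo cs fuel hi = 1 ∨ ∃ h2, pvExpo cs fuel hi = 2 * h2 ∧ 1 ≤ h2 ∧ pvOk cs h2 = false) := by
  intro fuel
  induction fuel with
  | zero =>
    intro hi h1 hb hinv
    simp only [pvExpo]
    have hbh : b ≤ hi := by simpa using hb
    exact ⟨hmono b hi hb1 hbh hokb, h1, hinv⟩
  | succ n ih =>
    intro hi h1 hb hinv
    cases hcase : pvOk cs hi with
    | true =>
      have hred : pvExpo cs (Nat.succ n) hi = hi := by simp [pvExpo, hcase]
      rw [hred]
      exact ⟨hcase, h1, hinv⟩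
    | false =>
      have hred : pvExpo cs (Nat.succ n) hi = pvExpo cs n (hi * 2) := by simp [pvExpo, hcase]
      rw [hred]
      have heq : hi * (2 : Int) ^ (n + 1) = hi * 2 * 2 ^ n := by ring
      refine ih (hi * 2) (by omega) (by rw [heq] at hb; exact hb) ?_
      exact Or.inr ⟨hi, by ring, h1, hcase⟩

-- B's binary search: returns a succeeding value whose predecessor fails (or 1)
theorem pvBin_spec (cs : List Int) :
    ∀ (n : Nat) (lo hi : Int), (hi - lo).toNat ≤ n → 1 ≤ lo → lo ≤ hi → pvOk cs hi = true →
      (lo = 1 ∨ pvOk cs (lo - 1) = false) →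
      pvOk cs (pvBin cs n lo hi) = true ∧ 1 ≤ pvBin cs n lo hi ∧
        (pvBin cs n lo hi = 1 ∨ pvOk cs (pvBin cs n lo hi - 1) = false) := by
  intro n
  induction n with
  | zero =>
    intro lo hi hn h1 hle hok hinv
    have hEq : lo = hi := by omega
    simp only [pvBin]
    exact ⟨hEq ▸ hok, h1, hinv⟩
  | succ n ih =>
    intro lo hi hn h1 hle hok hinv
    by_cases h : lo < hi
    · simp only [pvBin, if_pos h]
      have hm2 : PySem.Int.floordiv (lo + hi) 2 = (lo + hi) / 2 :=
        PySem.Int.floordiv_eq_ediv_of_pos (by omega)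
      simp only [hm2]
      have hml : lo ≤ (lo + hi) / 2 := by omega
      have hmh : (lo + hi) / 2 < hi := by omega
      cases hok2 : pvOk cs ((lo + hi) / 2) with
      | true =>
        rw [if_pos rfl]
        exact ih lo ((lo + hi) / 2) (by omega) h1 hml hok2 hinv
      | false =>
        rw [if_neg (by simp)]
        refine ih ((lo + hi) / 2 + 1) hi (by omega) (by omega) (by omega) hok (Or.inr ?_)
        simpa using hok2
    · simp only [pvBin, if_neg h]
      have hEq : lo = hi := by omega
      exact ⟨hEq ▸ hok, h1, hinv⟩

-- the two normal forms agree, and the whole equivalence for a normalised list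
theorem pvMain_core (N : List Int) (b0 : Int) (s : List Int) (hNs : N = b0 :: s) (hb0 : 0 ≤ b0)
    (hokb : pvOk N (pvMaxAbs N + 1) = true) :
    pvLoopA N ((pvMaxAbs N).toNat + 2) 1 =
      pvBin N
        ((pvExpo N ((pvMaxAbs N).toNat + 2) 1 -
          (if 1 < pvExpo N ((pvMaxAbs N).toNat + 2) 1 then
            PySem.Int.floordiv (pvExpo N ((pvMaxAbs N).toNat + 2) 1) 2 + 1 else 1)).toNat)
        (if 1 < pvExpo N ((pvMaxAbs N).toNat + 2) 1 then
          PySem.Int.floordiv (pvExpo N ((pvMaxAbs N).toNat + 2) 1) 2 + 1 else 1)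
        (pvExpo N ((pvMaxAbs N).toNat + 2) 1) := by
  have hM0 : 0 ≤ pvMaxAbs N := pvMaxAbs_nonneg N
  set M := pvMaxAbs N with hMdef
  have htn : ((M.toNat : Int)) = M := Int.toNat_of_nonneg hM0
  have hmono : ∀ x y : Int, 1 ≤ x → x ≤ y → pvOk N x = true → pvOk N y = true := by
    intro x y hx hxy hok
    rw [hNs] at hok ⊢
    simp only [pvOk] at hok ⊢
    exact pvOkAux_mono hx hxy s b0 b0 hb0 le_rfl hok
  -- A side
  have hA := pvLoopA_spec N (M + 1) hokb (M.toNat + 2) 1 (by omega) (by omega)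
    (by push_cast [htn]; omega) (by intro x hx1 hx2; exfalso; omega)
  obtain ⟨hokA, hA1, hAinv⟩ := hA
  -- B side: the power bound for the exponential phase
  have hpow : (M + 1 : Int) ≤ 1 * (2 : Int) ^ (M.toNat + 2) := by
    have h1 : M.toNat < 2 ^ M.toNat := Nat.lt_two_pow_self
    have h2 : (2 : Nat) ^ M.toNat ≤ 2 ^ (M.toNat + 2) := Nat.pow_le_pow_right (by norm_num) (by omega)
    have h3 : ((M.toNat : Int)) + 1 ≤ (((2 : Nat) ^ (M.toNat + 2) : Nat) : Int) := by
      exact_mod_cast Nat.succ_le_of_lt (lt_of_lt_of_le h1 h2)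
    have h4 : (((2 : Nat) ^ (M.toNat + 2) : Nat) : Int) = (2 : Int) ^ (M.toNat + 2) := by
      push_cast; ring
    rw [htn, h4] at h3
    linarith
  have hE := pvExpo_spec N (M + 1) (by omega) hokb hmono (M.toNat + 2) 1 (by omega) hpow (Or.inl rfl)
  obtain ⟨hokR, hR1, hRinv⟩ := hE
  set R := pvExpo N (M.toNat + 2) 1 with hRdef
  set lo := (if 1 < R then PySem.Int.floordiv R 2 + 1 else 1) with hlo
  have hloprops : 1 ≤ lo ∧ lo ≤ R ∧ (lo = 1 ∨ pvOk N (lo - 1) = false) := by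
    by_cases h : 1 < R
    · rcases hRinv with h1 | ⟨h2, hR2, hh2, hokh2⟩
      · exfalso; omega
      · have hfd : PySem.Int.floordiv R 2 = h2 := by
          rw [PySem.Int.floordiv_eq_ediv_of_pos (by omega), hR2]; omega
        rw [hlo, if_pos h, hfd]
        refine ⟨by omega, by omega, Or.inr ?_⟩
        simpa using hokh2
    · rw [hlo, if_neg h]
      exact ⟨le_refl 1, by omega, Or.inl rfl⟩
  obtain ⟨hlo1, hloR, hloinv⟩ := hloprops
  have hB := pvBin_spec N ((R - lo).toNat) lo R le_rfl hlo1 hloR hokR hloinv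
  obtain ⟨hokB, hB1, hBinv⟩ := hB
  -- uniqueness of the least succeeding xi
  set x := pvLoopA N (M.toNat + 2) 1 with hxdef
  set r := pvBin N ((R - lo).toNat) lo R with hrdef
  rcases lt_trichotomy x r with hlt | heq | hgt
  · exfalso
    rcases hBinv with hr1 | hf
    · omega
    · have hxr : pvOk N (r - 1) = true := hmono x (r - 1) (by omega) (by omega) hokA
      rw [hf] at hxr
      simp at hxr
  · exact heq
  · exfalso
    have := hAinv r hB1 hgt
    rw [hokB] at this
    simp at this

-- ===== VERDICT (by name: the statement is the Claim_ definition above) =====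
theorem find_bound_spec : Claim_equal_find_bound := by
  intro coefs_ _ hpre
  unfold Spec_find_bound
  obtain ⟨hne, hcond⟩ := hpre
  obtain ⟨a, t, rfl⟩ : ∃ a t, coefs_ = a :: t := by
    cases coefs_ with
    | nil => exact absurd rfl hne
    | cons a t => exact ⟨a, t, rfl⟩
  have hg : ((PySem.List.pyGet? (a :: t) 0).getD 0) = a := by
    simp
  by_cases ha : a < 0
  · -- A negates, B negates: cs = (-a) :: map neg t with -a ≥ 1
    simp only [find_bound, find_bound_alt, hg, if_pos ha, if_neg (by omega : ¬ (0 : Int) ≤ a)]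
    have hsh : (a :: t).map (fun i => -i) = (-a) :: t.map (fun i => -i) := rfl
    have hsh' : (a :: t).map (fun c => -c) = (a :: t).map (fun i => -i) := rfl
    rw [hsh']
    refine pvMain_core _ (-a) (t.map (fun i => -i)) hsh (by omega) ?_
    rw [hsh]
    simp only [pvOk]
    refine pvOkAux_ge1 (pvMaxAbs_nonneg _) _ _ ?_ (by omega)
    intro c hc
    exact pvMem_le_pvMaxAbs _ c (hsh ▸ List.mem_cons_of_mem _ hc)
  · -- cs = a :: t with a ≥ 0
    simp only [find_bound, find_bound_alt, hg, if_neg ha, if_pos (by omega : (0 : Int) ≤ a)]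
    refine pvMain_core _ a t rfl (by omega) ?_
    simp only [pvOk]
    by_cases ha2 : 0 < a
    · refine pvOkAux_ge1 (pvMaxAbs_nonneg _) _ _ ?_ (by omega)
      intro c hc
      exact pvMem_le_pvMaxAbs _ c (List.mem_cons_of_mem _ hc)
    · have ha0 : a = 0 := by omega
      subst ha0
      have hcond' : t.dropWhile (fun c => c == 0) = [] ∨
          0 < (t.dropWhile (fun c => c == 0)).headD 0 := by
        rcases hcond with h | h
        · exfalso; simp at h
        · simpa [List.dropWhile_cons] using h
      exact pvOkAux_zeros (pvMaxAbs_nonneg _) t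
        (fun c hc => pvMem_le_pvMaxAbs _ c (List.mem_cons_of_mem _ hc)) hcond'
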